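-- pv_equiv track=rewrite | github.com/Clazariuk1/100-days-of-code | pythonicRefactor/validAnagram.py | valid_anagrams
-- ===== SOURCE A (Python) =====
-- from collections import Counter
--
-- def valid_anagrams(s, t):
--     if len(s) != len(t) or s == t:
--         return False
--
--     counterS = Counter(s)
--     counterT = Counter(t)
--
--     for char in counterS:
--         if counterS[char] != counterT[char]:
--             return False
--
--     return True
-- ===== SOURCE B (Python) =====
-- def valid_anagrams(s, t):
--     if len(s) != len(t) or s == t:
--         return False
--     remaining = list(t)
--     for c in s:
--         if c in remaining:
--             remaining.remove(c)
--         else: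
--             return False
--     return True
-- ===== Notes on version B (the rewrite author's own statement) =====
-- stated objective: alternative
-- what changed: Replaces A's two Counter frequency tables and per-key comparison loop with an elimination scan: each character of s removes its first occurrence from a leftover copy of t, failing on a missing character.
import Mathlib
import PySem

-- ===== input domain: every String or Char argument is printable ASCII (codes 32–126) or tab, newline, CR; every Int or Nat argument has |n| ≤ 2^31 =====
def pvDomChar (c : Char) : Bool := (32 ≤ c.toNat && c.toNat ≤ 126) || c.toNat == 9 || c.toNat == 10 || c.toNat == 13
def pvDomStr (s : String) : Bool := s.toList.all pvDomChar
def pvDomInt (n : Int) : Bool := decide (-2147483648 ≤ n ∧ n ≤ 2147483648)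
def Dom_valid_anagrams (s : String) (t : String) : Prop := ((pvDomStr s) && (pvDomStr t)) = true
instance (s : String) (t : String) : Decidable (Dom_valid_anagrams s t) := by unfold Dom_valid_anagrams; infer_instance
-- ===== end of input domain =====

-- B replaces A's two Counter tables and per-key comparison loop with an elimination scan
-- (remove each char of s from a leftover copy of t); alternative algorithm, same guards.

-- ===== PORT A =====
def valid_anagrams (s : String) (t : String) : Bool :=
  if (PySem.Str.len s != PySem.Str.len t) || (s == t) then false
  else
    let counterS := PySem.Dict.counter s.toList
    let counterT := PySem.Dict.counter t.toList
    -- 'for char in counterS: if counterS[char] != counterT[char]: return False' then 'return True'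
    counterS.keys.all (fun c => counterS.getD c 0 == counterT.getD c 0)

-- ===== PORT B =====
-- 'for c in s: if c in remaining: remaining.remove(c) else: return False'; Python's
-- list.remove drops the first equal element, which is exactly List.erase here.
def vaEliminate : List Char → List Char → Bool
  | [], _ => true
  | c :: cs, remaining =>
      if remaining.contains c then vaEliminate cs (remaining.erase c) else false

def valid_anagrams_alt (s : String) (t : String) : Bool :=
  if (PySem.Str.len s != PySem.Str.len t) || (s == t) then false
  else vaEliminate s.toList t.toList

-- ===== PRECONDITION & SPEC =====
def Spec_valid_anagrams (s : String) (t : String) (out : Bool) : Prop := out = valid_anagrams_alt s t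
instance (s : String) (t : String) (out : Bool) : Decidable (Spec_valid_anagrams s t out) := by unfold Spec_valid_anagrams; infer_instance

-- ===== CLAIM (what is proved, stated in full; the proofs are below) =====
def Claim_equal_valid_anagrams : Prop := ∀ (s : String) (t : String), Dom_valid_anagrams s t → Spec_valid_anagrams s t (valid_anagrams s t)

-- ===== LEMMAS AND PROOFS =====

-- The elimination loop succeeds exactly when its first argument is a sub-multiset of the second.
theorem vaEliminate_iff_subperm (xs : List Char) : ∀ ys : List Char,
    vaEliminate xs ys = true ↔ xs.Subperm ys := by
  induction xs with
  | nil => intro ys; simp [vaEliminate, List.nil_subperm]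
  | cons c cs ih =>
    intro ys
    simp only [vaEliminate]
    by_cases hmem : c ∈ ys
    · rw [if_pos (List.contains_iff_mem.mpr hmem), ih]
      constructor
      · intro h
        exact ((List.subperm_cons c).mpr h).trans (List.perm_cons_erase hmem).symm.subperm
      · intro h
        have := List.Subperm.erase c h
        simpa using this
    · rw [if_neg (by simpa [List.contains_iff_mem] using hmem)]
      constructor
      · intro h; cases h
      · intro h
        exact absurd (h.subset (List.mem_cons_self ..)) hmem
    
-- On equal-length lists, 'every element of ls has equal counts in ls and lt' is exactly permutation.
theorem perm_of_length_eq_of_count (ls lt : List Char) (hlen : ls.length = lt.length)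
    (hc : ∀ c ∈ ls, ls.count c = lt.count c) : ls.Perm lt := by
  have hsub : ls.Subperm lt := List.subperm_ext_iff.mpr (fun x hx => (hc x hx).le)
  exact hsub.perm_of_length_le hlen.ge

-- A's Counter loop equals B's elimination loop once the lengths agree.
theorem counter_all_eq_eliminate (ls lt : List Char) (hlen : ls.length = lt.length) :
    ((PySem.Dict.counter ls).keys.all
      (fun c => (PySem.Dict.counter ls).getD c 0 == (PySem.Dict.counter lt).getD c 0))
    = vaEliminate ls lt := by
  rw [show ∀ a b : Bool, a = b ↔ (a = true ↔ b = true) from by decide]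
  rw [vaEliminate_iff_subperm]
  simp only [List.all_eq_true, PySem.Dict.getD_counter, PySem.Dict.keys_counter,
    PySem.Set.mem_ofList, beq_iff_eq, Nat.cast_inj]
  constructor
  · intro hc
    exact (perm_of_length_eq_of_count ls lt hlen hc).subperm
  · intro hs c _
    exact ((hs.perm_of_length_le hlen.ge).count_eq c)

-- ===== VERDICT (by name: the statement is the Claim_ definition above) =====
theorem valid_anagrams_spec : Claim_equal_valid_anagrams := by
  intro s t _
  unfold Spec_valid_anagrams valid_anagrams valid_anagrams_alt
  split_ifs with h
  · rfl
  · have hlen : s.toList.length = t.toList.length := by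
      simp only [Bool.or_eq_true, bne_iff_ne, ne_eq, PySem.Str.len_eq] at h
      exact_mod_cast not_or.mp h |>.1 |> not_ne_iff.mp
    exact counter_all_eq_eliminate s.toList t.toList hlen
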